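-- pv_equiv track=rewrite | github.com/jonasniemeyer/findata | yahoo.py | _merge_cashflow_statements
-- ===== SOURCE A (Python) =====
-- def _merge_cashflow_statements(json_data, html_data) -> dict:
--     variables = (
--         "Net Income",
--         "Depreciation & Amortization",
--         "Change in Acounts Receivable",
--         "Change in Inventories",
--         "Change in Liabilities",
--         "Other Operating Activities",
--         "Gains/Losses on Currency Changes",
--         "Total Cashflow From Operating Activities",
--
--         "Capital Expenditures",
--         "Change in Total Investments",
--         "Other Investing Activities",
--         "Total Cashflow From Investing Activities",
--
--         "Free Cashflow",
--
--         "Issuance of Debt",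
--         "Repayment of Debt",
--         "Total Debt Issued", # wrong data => Net Debt Issued
--         "Issuance of Common Stock",
--         "Repurchases of Common Stock", # wrong data => repurchase of capital stock
--         "Total Dividends Paid",
--         "Other Financing Activities",
--         "Total Cashflow From Financing Activities",
--
--         "Change in Cash and Cash Equivalents"
--     )
--     ordered_data = {}
--     for date in html_data:
--         ordered_data[date] = {}
--         for var in variables:
--             if var in html_data[date].keys():
--                 ordered_data[date][var] = html_data[date][var]
--             elif date != "TTM" and var in json_data[date].keys():
--                 ordered_data[date][var] = json_data[date][var]
--             else:
--                 ordered_data[date][var] = None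
--     return ordered_data
-- ===== SOURCE B (Python) =====
-- def _merge_cashflow_statements(json_data, html_data) -> dict:
--     variables = (
--         "Net Income",
--         "Depreciation & Amortization",
--         "Change in Acounts Receivable",
--         "Change in Inventories",
--         "Change in Liabilities",
--         "Other Operating Activities",
--         "Gains/Losses on Currency Changes",
--         "Total Cashflow From Operating Activities",
--         "Capital Expenditures",
--         "Change in Total Investments",
--         "Other Investing Activities",
--         "Total Cashflow From Investing Activities",
--         "Free Cashflow",
--         "Issuance of Debt",
--         "Repayment of Debt",
--         "Total Debt Issued",
--         "Issuance of Common Stock",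
--         "Repurchases of Common Stock",
--         "Total Dividends Paid",
--         "Other Financing Activities",
--         "Total Cashflow From Financing Activities",
--         "Change in Cash and Cash Equivalents"
--     )
--     wanted = set(variables)
--     ordered_data = {}
--     for date in html_data:
--         # pre-fill the row with every variable defaulting to None, then let the
--         # sources push their values in: json first (skipped for TTM), html last.
--         row = dict.fromkeys(variables)
--         if date != "TTM":
--             for var, val in json_data.get(date, {}).items():
--                 if var in wanted:
--                     row[var] = val
--         for var, val in html_data[date].items():
--             if var in wanted:
--                 row[var] = val
--         ordered_data[date] = row
--     return ordered_data
-- ===== Notes on version B (the rewrite author's own statement) =====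
-- stated objective: alternative
-- what changed: A gathers: per date it loops over the fixed variable tuple and for each variable probes html then json with an if/elif membership cascade; B scatters: per date it pre-fills the row with dict.fromkeys(variables) (all None) and then pushes the json row (skipped for TTM) and then the html row into it, writing only keys in the wanted set, so the inner loops run over the source rows' items instead of over the variables.
import Mathlib
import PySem

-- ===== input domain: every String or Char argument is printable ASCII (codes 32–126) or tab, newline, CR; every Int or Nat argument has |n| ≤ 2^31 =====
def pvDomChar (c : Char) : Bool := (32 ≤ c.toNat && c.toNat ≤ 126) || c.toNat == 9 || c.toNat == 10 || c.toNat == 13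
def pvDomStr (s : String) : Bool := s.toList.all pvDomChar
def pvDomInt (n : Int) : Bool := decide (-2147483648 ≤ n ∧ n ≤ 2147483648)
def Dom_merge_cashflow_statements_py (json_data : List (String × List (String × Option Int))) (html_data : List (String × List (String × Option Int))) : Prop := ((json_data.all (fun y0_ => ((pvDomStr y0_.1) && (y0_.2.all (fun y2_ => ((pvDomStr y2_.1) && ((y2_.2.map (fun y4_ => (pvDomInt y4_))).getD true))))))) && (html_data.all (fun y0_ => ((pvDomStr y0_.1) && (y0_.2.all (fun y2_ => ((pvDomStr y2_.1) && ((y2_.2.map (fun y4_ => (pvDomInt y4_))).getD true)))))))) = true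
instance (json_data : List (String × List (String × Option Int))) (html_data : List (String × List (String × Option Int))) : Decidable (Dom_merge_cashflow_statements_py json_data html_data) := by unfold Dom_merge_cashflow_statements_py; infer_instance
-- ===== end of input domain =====

-- B inverts A's data flow: instead of A's per-variable if/elif membership cascade over the two
-- source dicts, B pre-fills each date's row with dict.fromkeys(variables) (all None) and then
-- pushes the json row (skipped for "TTM") and then the html row into it (html wins), writing
-- only keys in the wanted variable set. Where A raises KeyError (non-"TTM" html date absent
-- from json_data while some variable is missing from that html row) B's json_data.get(date, {})
-- returns the row filled from the html data alone; those inputs are outside Pre_.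


-- the fixed 'variables' tuple of the Python source (identical in A and B)
def cfVars : List String := [
  "Net Income",
  "Depreciation & Amortization",
  "Change in Acounts Receivable",
  "Change in Inventories",
  "Change in Liabilities",
  "Other Operating Activities",
  "Gains/Losses on Currency Changes",
  "Total Cashflow From Operating Activities",
  "Capital Expenditures",
  "Change in Total Investments",
  "Other Investing Activities",
  "Total Cashflow From Investing Activities",
  "Free Cashflow",
  "Issuance of Debt",
  "Repayment of Debt",
  "Total Debt Issued",
  "Issuance of Common Stock",
  "Repurchases of Common Stock",
  "Total Dividends Paid",
  "Other Financing Activities",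
  "Total Cashflow From Financing Activities",
  "Change in Cash and Cash Equivalents"]

-- ===== PORT A =====
-- for date in html_data: ordered_data[date] = {}; for var in variables: if/elif/else assignment.
-- json_data[date] raises KeyError in Python when absent; the port reads [] there — excluded by Pre_.
def merge_cashflow_statements_py (json_data : List (String × List (String × Option Int))) (html_data : List (String × List (String × Option Int))) : List (String × List (String × Option Int)) :=
  (html_data.foldl (fun (ordered : PySem.Dict String (List (String × Option Int))) entry =>
      ordered.insert entry.1
        (cfVars.foldl (fun (row : PySem.Dict String (Option Int)) var =>
          if (PySem.Dict.mk ((PySem.Dict.mk html_data).getD entry.1 [])).contains var then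
            row.insert var ((PySem.Dict.mk ((PySem.Dict.mk html_data).getD entry.1 [])).getD var none)
          else if entry.1 ≠ "TTM" ∧ (PySem.Dict.mk ((PySem.Dict.mk json_data).getD entry.1 [])).contains var then
            row.insert var ((PySem.Dict.mk ((PySem.Dict.mk json_data).getD entry.1 [])).getD var none)
          else
            row.insert var none) PySem.Dict.empty).items) PySem.Dict.empty).items

-- ===== PORT B =====
-- wanted = set(variables)
def cfWanted : PySem.Set String := PySem.Set.ofList cfVars
-- row = dict.fromkeys(variables)   (every variable mapped to None, in order)
def cfFromKeys : PySem.Dict String (Option Int) :=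
  cfVars.foldl (fun (r : PySem.Dict String (Option Int)) var => r.insert var none) PySem.Dict.empty
-- 'for var, val in src.items(): if var in wanted: row[var] = val'
def cfPatch (src : List (String × Option Int)) (row : PySem.Dict String (Option Int)) : PySem.Dict String (Option Int) :=
  src.foldl (fun (r : PySem.Dict String (Option Int)) kv =>
    if cfWanted.contains kv.1 then r.insert kv.1 kv.2 else r) row
-- for date in html_data: row = fromkeys; if date != "TTM": push json_data.get(date, {}); push html_data[date]
def merge_cashflow_statements_py_alt (json_data : List (String × List (String × Option Int))) (html_data : List (String × List (String × Option Int))) : List (String × List (String × Option Int)) :=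
  (html_data.foldl (fun (ordered : PySem.Dict String (List (String × Option Int))) entry =>
      ordered.insert entry.1
        ((cfPatch ((PySem.Dict.mk html_data).getD entry.1 [])
            (if entry.1 ≠ "TTM" then
               cfPatch ((PySem.Dict.mk json_data).getD entry.1 []) cfFromKeys
             else cfFromKeys)).items)) PySem.Dict.empty).items

-- ===== PRECONDITION & SPEC =====
-- Pre_ excludes (1) the inputs where A raises KeyError (a non-"TTM" html date absent from
-- json_data whose html row misses some variable), and (2) association lists with duplicate keys
-- (outer date keys or inner row keys) — those correspond to no Python dict input, so A never
-- sees them and any first-vs-last-match behaviour of the ports there is accidental.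
def Pre_merge_cashflow_statements_py (json_data : List (String × List (String × Option Int))) (html_data : List (String × List (String × Option Int))) : Prop :=
  (∀ p ∈ html_data, p.1 ≠ "TTM" → (PySem.Dict.mk json_data).contains p.1 = false →
     ∀ v ∈ cfVars, (PySem.Dict.mk ((PySem.Dict.mk html_data).getD p.1 [])).contains v = true) ∧
  (json_data.map Prod.fst).Nodup ∧ (html_data.map Prod.fst).Nodup ∧
  (∀ p ∈ json_data, (p.2.map Prod.fst).Nodup) ∧
  (∀ p ∈ html_data, (p.2.map Prod.fst).Nodup)
instance (json_data : List (String × List (String × Option Int))) (html_data : List (String × List (String × Option Int))) : Decidable (Pre_merge_cashflow_statements_py json_data html_data) := by unfold Pre_merge_cashflow_statements_py; infer_instance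

def pvWitness_merge_cashflow_statements_py : (List (String × List (String × Option Int))) × (List (String × List (String × Option Int))) :=
  ([("2020", [("Net Income", some 7)])], [("2020", [("Free Cashflow", none)]), ("TTM", [])])

def Spec_merge_cashflow_statements_py (json_data : List (String × List (String × Option Int))) (html_data : List (String × List (String × Option Int))) (out : List (String × List (String × Option Int))) : Prop := out = merge_cashflow_statements_py_alt json_data html_data
instance (json_data : List (String × List (String × Option Int))) (html_data : List (String × List (String × Option Int))) (out : List (String × List (String × Option Int))) : Decidable (Spec_merge_cashflow_statements_py json_data html_data out) := by unfold Spec_merge_cashflow_statements_py; infer_instance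

-- ===== CLAIM (what is proved, stated in full; the proofs are below) =====
def Claim_equal_merge_cashflow_statements_py : Prop := ∀ (json_data : List (String × List (String × Option Int))) (html_data : List (String × List (String × Option Int))), Dom_merge_cashflow_statements_py json_data html_data → Pre_merge_cashflow_statements_py json_data html_data → Spec_merge_cashflow_statements_py json_data html_data (merge_cashflow_statements_py json_data html_data)


-- ===== LEMMAS AND PROOFS =====

theorem mem_cfWanted (v : String) : cfWanted.contains v = true ↔ v ∈ cfVars :=
  (PySem.Set.contains_iff cfWanted v).trans (PySem.Set.mem_ofList cfVars v)

-- lookup in a dict.fromkeys-style fold: every inserted value is none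
theorem get?_foldl_insert_none (ks : List String) (d : PySem.Dict String (Option Int)) (v : String) :
    (ks.foldl (fun (r : PySem.Dict String (Option Int)) k => r.insert k none) d).get? v
      = if v ∈ ks then some none else d.get? v := by
  induction ks generalizing d with
  | nil => simp
  | cons k t ih =>
    simp only [List.foldl_cons]
    rw [ih]
    by_cases hm : v ∈ t
    · simp [hm]
    · by_cases hv : v = k
      · subst hv; simp [hm, PySem.Dict.get?_insert_self]
      · simp [hm, hv, PySem.Dict.get?_insert_of_ne _ _ hv]

theorem get?_cfFromKeys (v : String) :
    cfFromKeys.get? v = if v ∈ cfVars then some none else none := by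
  unfold cfFromKeys
  rw [get?_foldl_insert_none]
  simp [PySem.Dict.get?_empty]

theorem keys_cfFromKeys : cfFromKeys.keys = cfVars := by decide

theorem contains_cfFromKeys (k : String) (h : cfWanted.contains k = true) :
    cfFromKeys.contains k = true := by
  rw [PySem.Dict.contains_eq_isSome_get?, get?_cfFromKeys]
  simp [(mem_cfWanted k).1 h]

-- lookup after pushing a nodup source row into a dict: source value when wanted and present,
-- else the underlying value
theorem get?_cfPatch (src : List (String × Option Int)) (row : PySem.Dict String (Option Int))
    (v : String) (h : (src.map Prod.fst).Nodup) :
    (cfPatch src row).get? v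
      = (if cfWanted.contains v then (PySem.Dict.mk src).get? v else none).orElse
          (fun _ => row.get? v) := by
  unfold cfPatch
  induction src generalizing row with
  | nil => simp [PySem.Dict.get?]
  | cons kv t ih =>
    obtain ⟨k, w⟩ := kv
    simp only [List.map_cons, List.nodup_cons] at h
    simp only [List.foldl_cons]
    by_cases hk : cfWanted.contains k = true
    · rw [if_pos hk, ih _ h.2, PySem.Dict.get?_mk_cons]
      by_cases hv : k = v
      · subst hv
        have hk' : k ∈ cfWanted := by simpa using hk
        have ht : (PySem.Dict.mk t).get? k = none :=
          (PySem.Dict.get?_eq_none_iff_not_mem_keys _ _).2 (by simpa [PySem.Dict.keys] using h.1)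
        simp [ht, hk', PySem.Dict.get?_insert_self]
      · rw [PySem.Dict.get?_insert_of_ne row w (fun e => hv e.symm)]
        have hb : (k == v) = false := by simp [hv]
        simp [hb]
    · rw [if_neg hk, ih _ h.2, PySem.Dict.get?_mk_cons]
      by_cases hv : k = v
      · subst hv
        have hk' : k ∉ cfWanted := by simpa using hk
        have ht : (PySem.Dict.mk t).get? k = none :=
          (PySem.Dict.get?_eq_none_iff_not_mem_keys _ _).2 (by simpa [PySem.Dict.keys] using h.1)
        simp [hk']
      · have hb : (k == v) = false := by simp [hv]
        simp [hb]

-- pushing a source row never changes the key list when every wanted key is already present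
theorem keys_cfPatch (src : List (String × Option Int)) (row : PySem.Dict String (Option Int))
    (h : ∀ k, cfWanted.contains k = true → row.contains k = true) :
    (cfPatch src row).keys = row.keys := by
  unfold cfPatch
  induction src generalizing row with
  | nil => rfl
  | cons kv t ih =>
    simp only [List.foldl_cons]
    by_cases hk : cfWanted.contains kv.1 = true
    · rw [if_pos hk,
        ih _ (fun k hkw => by rw [PySem.Dict.contains_insert]; simp [h k hkw]),
        PySem.Dict.keys_insert_of_contains _ _ (h kv.1 hk)]
    · rw [if_neg hk]
      exact ih _ h

-- any row getD returns from an assoc-list dict is [] or one of the list's rows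
theorem getD_mk_mem (d : List (String × List (String × Option Int))) (k : String) :
    (PySem.Dict.mk d).getD k [] = [] ∨ ∃ p ∈ d, (PySem.Dict.mk d).getD k [] = p.2 := by
  rcases h : (PySem.Dict.mk d).get? k with _ | r
  · left; exact PySem.Dict.getD_of_get?_eq_none _ _ h
  · right
    have hm := PySem.Dict.mem_items_of_get?_eq_some _ h
    exact ⟨(k, r), hm, PySem.Dict.getD_of_get?_eq_some _ _ h⟩

-- the value A's cascade stores for one variable equals what B's patched row holds there
theorem row_value_eq (json_data html_data : List (String × List (String × Option Int))) (date : String)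
    (hjn : (((PySem.Dict.mk json_data).getD date []).map Prod.fst).Nodup)
    (hhn : (((PySem.Dict.mk html_data).getD date []).map Prod.fst).Nodup)
    (var : String) (hvar : var ∈ cfVars) :
    (if (PySem.Dict.mk ((PySem.Dict.mk html_data).getD date [])).contains var then
       (PySem.Dict.mk ((PySem.Dict.mk html_data).getD date [])).getD var none
     else if date ≠ "TTM" ∧ (PySem.Dict.mk ((PySem.Dict.mk json_data).getD date [])).contains var then
       (PySem.Dict.mk ((PySem.Dict.mk json_data).getD date [])).getD var none
     else none)
    = (cfPatch ((PySem.Dict.mk html_data).getD date [])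
        (if date ≠ "TTM" then cfPatch ((PySem.Dict.mk json_data).getD date []) cfFromKeys
         else cfFromKeys)).getD var none := by
  have hw : cfWanted.contains var = true := (mem_cfWanted var).2 hvar
  conv_rhs => rw [PySem.Dict.getD_eq_get?_getD]
  rw [get?_cfPatch _ _ _ hhn, if_pos hw]
  rcases hg : (PySem.Dict.mk ((PySem.Dict.mk html_data).getD date [])).get? var with _ | w
  · have hc : (PySem.Dict.mk ((PySem.Dict.mk html_data).getD date [])).contains var = false := by
      rw [PySem.Dict.contains_eq_isSome_get?, hg]; rfl
    simp only [hc, Bool.false_eq_true, if_false, Option.orElse_none]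
    by_cases ht : date = "TTM"
    · simp [ht, get?_cfFromKeys, hvar]
    · simp only [ht, ne_eq, not_false_iff, if_true]
      rw [get?_cfPatch _ _ _ hjn]
      simp only [hw, if_true]
      rcases hjg : (PySem.Dict.mk ((PySem.Dict.mk json_data).getD date [])).get? var with _ | u
      · have hjc : (PySem.Dict.mk ((PySem.Dict.mk json_data).getD date [])).contains var = false := by
          rw [PySem.Dict.contains_eq_isSome_get?, hjg]; rfl
        simp [hjc, get?_cfFromKeys, hvar]
      · have hjc : (PySem.Dict.mk ((PySem.Dict.mk json_data).getD date [])).contains var = true := by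
          rw [PySem.Dict.contains_eq_isSome_get?, hjg]; rfl
        simp [hjc, PySem.Dict.getD_of_get?_eq_some _ _ hjg]
  · have hc : (PySem.Dict.mk ((PySem.Dict.mk html_data).getD date [])).contains var = true := by
      rw [PySem.Dict.contains_eq_isSome_get?, hg]; rfl
    simp [hc, PySem.Dict.getD_of_get?_eq_some _ _ hg]

-- ===== VERDICT (by name: the statements are the Claim_ definitions above) =====
theorem merge_cashflow_statements_py_spec : Claim_equal_merge_cashflow_statements_py := by
  intro json_data html_data _hdom hpre
  obtain ⟨-, -, -, hj, hh⟩ := hpre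
  unfold Spec_merge_cashflow_statements_py merge_cashflow_statements_py merge_cashflow_statements_py_alt
  apply congrArg PySem.Dict.items
  apply PySem.List.foldl_congr_mem
  intro ordered entry _hmem
  apply congrArg (PySem.Dict.insert ordered entry.1)
  -- row-level: A's gather fold and B's patched fromkeys dict have the same items
  have hjn : (((PySem.Dict.mk json_data).getD entry.1 []).map Prod.fst).Nodup := by
    rcases getD_mk_mem json_data entry.1 with h | ⟨p, hp, h⟩
    · simp [h]
    · rw [h]; exact hj p hp
  have hhn : (((PySem.Dict.mk html_data).getD entry.1 []).map Prod.fst).Nodup := by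
    rcases getD_mk_mem html_data entry.1 with h | ⟨p, hp, h⟩
    · simp [h]
    · rw [h]; exact hh p hp
  set B := cfPatch ((PySem.Dict.mk html_data).getD entry.1 [])
      (if entry.1 ≠ "TTM" then cfPatch ((PySem.Dict.mk json_data).getD entry.1 []) cfFromKeys
       else cfFromKeys) with hB
  have hbase : ∀ k, cfWanted.contains k = true →
      (if entry.1 ≠ "TTM" then cfPatch ((PySem.Dict.mk json_data).getD entry.1 []) cfFromKeys
       else cfFromKeys).contains k = true := by
    intro k hk
    by_cases ht : entry.1 = "TTM"
    · simpa [ht] using contains_cfFromKeys k hk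
    · simp only [ht, ne_eq, not_false_iff, if_true]
      rw [PySem.Dict.contains_iff_mem_keys, keys_cfPatch _ _ (fun k hk => contains_cfFromKeys k hk)]
      rw [← PySem.Dict.contains_iff_mem_keys]
      exact contains_cfFromKeys k hk
  have hBkeys : B.keys = cfVars := by
    rw [hB, keys_cfPatch _ _ hbase]
    by_cases ht : entry.1 = "TTM"
    · simp [ht, keys_cfFromKeys]
    · simp only [ht, ne_eq, not_false_iff, if_true]
      rw [keys_cfPatch _ _ (fun k hk => contains_cfFromKeys k hk), keys_cfFromKeys]
  have hBitems : B.items = cfVars.map (fun k => (k, B.getD k none)) := by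
    rw [PySem.Dict.items_eq_map_keys B (by rw [hBkeys]; decide) none, hBkeys]
  rw [hBitems]
  rw [PySem.List.foldl_congr_mem cfVars _
      (fun (row : PySem.Dict String (Option Int)) var => row.insert var
        (if (PySem.Dict.mk ((PySem.Dict.mk html_data).getD entry.1 [])).contains var then
           (PySem.Dict.mk ((PySem.Dict.mk html_data).getD entry.1 [])).getD var none
         else if entry.1 ≠ "TTM" ∧ (PySem.Dict.mk ((PySem.Dict.mk json_data).getD entry.1 [])).contains var then
           (PySem.Dict.mk ((PySem.Dict.mk json_data).getD entry.1 [])).getD var none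
         else none)) PySem.Dict.empty
      (fun acc var _ => by dsimp only; split_ifs <;> rfl)]
  rw [PySem.Dict.items_foldl_insert_fresh cfVars (fun a => a) _ PySem.Dict.empty
      (fun a _ => PySem.Dict.contains_empty a) (by simpa using (by decide : cfVars.Nodup))]
  rw [show (PySem.Dict.empty : PySem.Dict String (Option Int)).items = [] from rfl, List.nil_append]
  refine List.map_congr_left ?_
  intro var hvar
  have hv := row_value_eq json_data html_data entry.1 hjn hhn var hvar
  rw [← hB] at hv
  exact congrArg (fun x => (var, x)) hv
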